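-- pv_equiv track=rewrite | github.com/vladimirkostukovic/crypto_databricks_azure | databricks/notebooks/statistical_scorer.py | score_confluence
-- ===== SOURCE A (Python) =====
-- SCORING_WEIGHTS = {
--     # Zone quality (0-40 points)
--     "zone_strength": {
--         "threshold_high": 85,   # +15 points
--         "threshold_mid": 75,    # +10 points
--         "threshold_low": 65,    # +5 points
--     },
--     "confirmed_methods": {
--         3: 15,  # VP + OI + OB all confirm
--         2: 10,
--         1: 5,
--     },
--
--     # BOS confirmation (0-20 points)
--     "bos_confirmed": 15,
--     "bos_recency_hours": {
--         4: 5,    # BOS within 4 hours = +5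
--         12: 3,   # BOS within 12 hours = +3
--         24: 1,   # BOS within 24 hours = +1
--     },
--
--     # Multi-TF confluence (0-20 points)
--     "confluence_score": {
--         10: 20,  # 1d+4h+1h+15m
--         7: 15,   # 1d+4h or 4h+1h+15m
--         5: 10,   # 4h+15m or 1h+4h
--         3: 5,    # minimal confluence
--     },
--
--     # Sentiment alignment (0-20 points)
--     "crowding_alignment": 10,      # Crowded opposite to signal direction
--     "smart_money_alignment": 10,   # Smart money agrees with signal
--
--     # Zone behavior (historical) (bonus/penalty)
--     "bounce_rate_high": 5,     # Zone bounced >60% of touches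
--     "break_rate_high": -10,    # Zone broken >50% of times
--     "is_mirror_zone": 5,       # Tested from both sides
--
--     # Entry quality (0-10 points)
--     "distance_to_poc": {
--         0.5: 10,   # Within 0.5% of POC
--         1.0: 7,    # Within 1%
--         1.5: 3,    # Within 1.5%
--         2.0: 0,    # 2% = no bonus
--     },
-- }
--
-- def score_confluence(signal: dict) -> tuple:
--     """Score multi-TF confluence (0-20 points)"""
--     score = 0
--     breakdown = []
--
--     conf_score = signal.get("confluence_score") or 0
--
--     for threshold, points in sorted(SCORING_WEIGHTS["confluence_score"].items(), reverse=True):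
--         if conf_score >= threshold:
--             score += points
--             breakdown.append(f"confluence_{conf_score}:+{points}")
--             break
--
--     return score, breakdown
-- ===== SOURCE B (Python) =====
-- def score_confluence(sig: dict) -> tuple:
--     """Score multi-TF confluence (0-20 points)"""
--     conf_score = sig.get("confluence_score") or 0
--     # The weight table (3:5, 5:10, 7:15, 10:20) is an arithmetic progression:
--     # the bonus equals 5 points per threshold reached.
--     points = 5 * sum(1 for t in (3, 5, 7, 10) if conf_score >= t)
--     if points == 0:
--         return 0, []
--     return points, [f"confluence_{conf_score}:+{points}"]
-- ===== Notes on version B (the rewrite author's own statement) =====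
-- stated objective: alternative
-- what changed: Replaced the per-call sort and first-match scan of the weight table by an arithmetic aggregation: the bonus is computed as 5 points per threshold reached (counting how many of 3,5,7,10 conf_score meets), exploiting that the table is an arithmetic progression.
import Mathlib
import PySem

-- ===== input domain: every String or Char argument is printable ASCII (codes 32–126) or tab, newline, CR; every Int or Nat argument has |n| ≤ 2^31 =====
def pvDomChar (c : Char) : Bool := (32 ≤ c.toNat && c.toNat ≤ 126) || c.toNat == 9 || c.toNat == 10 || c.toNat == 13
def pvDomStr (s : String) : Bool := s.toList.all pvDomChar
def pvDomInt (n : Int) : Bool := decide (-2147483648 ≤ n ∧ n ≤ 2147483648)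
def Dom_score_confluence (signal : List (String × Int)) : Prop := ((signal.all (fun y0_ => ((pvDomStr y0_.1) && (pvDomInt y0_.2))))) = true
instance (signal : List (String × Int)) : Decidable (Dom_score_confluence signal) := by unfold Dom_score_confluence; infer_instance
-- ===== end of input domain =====

-- B replaces A's per-call sort and first-match scan of the weight table by an
-- arithmetic aggregation: 5 points per threshold reached (objective: alternative).

-- ===== PORT A =====
-- SCORING_WEIGHTS["confluence_score"] items in insertion order
def pvConfWeights : List (Int × Int) := [(10, 20), (7, 15), (5, 10), (3, 5)]

-- the for-loop with break: scan the sorted items, stop at the first threshold met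
def pvALoop (conf_score : Int) (score : Int) (breakdown : List String) :
    List (Int × Int) → Int × List String
  | [] => (score, breakdown)
  | (threshold, points) :: rest =>
    if conf_score ≥ threshold then
      (score + points,
       breakdown ++ ["confluence_" ++ PySem.Int.toStr conf_score ++ ":+" ++ PySem.Int.toStr points])
    else pvALoop conf_score score breakdown rest

def score_confluence (signal : List (String × Int)) : Int × List String :=
  -- signal.get("confluence_score") or 0
  let conf_score : Int :=
    match signal.lookup "confluence_score" with
    | none => 0
    | some v => if v = 0 then 0 else v
  pvALoop conf_score 0 []
    (PySem.List.sorted2 pvConfWeights (fun x => x.1) (fun x => x.2) true)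

-- ===== PORT B =====
def score_confluence_alt (signal : List (String × Int)) : Int × List String :=
  let conf_score : Int :=
    match signal.lookup "confluence_score" with
    | none => 0
    | some v => if v = 0 then 0 else v
  -- points = 5 * sum(1 for t in (3,5,7,10) if conf_score >= t)
  let points : Int := 5 * (([3, 5, 7, 10] : List Int).countP (fun t => conf_score ≥ t) : Int)
  if points = 0 then (0, [])
  else (points, ["confluence_" ++ PySem.Int.toStr conf_score ++ ":+" ++ PySem.Int.toStr points])

-- ===== PRECONDITION & SPEC =====
def Spec_score_confluence (signal : List (String × Int)) (out : Int × List String) : Prop := out = score_confluence_alt signal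
instance (signal : List (String × Int)) (out : Int × List String) : Decidable (Spec_score_confluence signal out) := by unfold Spec_score_confluence; infer_instance

-- ===== CLAIM (what is proved, stated in full; the proofs are below) =====
def Claim_equal_score_confluence : Prop := ∀ (signal : List (String × Int)), Dom_score_confluence signal → Spec_score_confluence signal (score_confluence signal)

-- ===== LEMMAS AND PROOFS =====
theorem pvSorted_weights :
    PySem.List.sorted2 pvConfWeights (fun x => x.1) (fun x => x.2) true =
      [(10, 20), (7, 15), (5, 10), (3, 5)] := by decide

-- core: for any conf_score, A's scan of the sorted table equals B's arithmetic form
theorem pvCore (c : Int) :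
    pvALoop c 0 [] [(10, 20), (7, 15), (5, 10), (3, 5)] =
      (let points : Int := 5 * (([3, 5, 7, 10] : List Int).countP (fun t => c ≥ t) : Int)
       if points = 0 then ((0 : Int), ([] : List String))
       else (points, ["confluence_" ++ PySem.Int.toStr c ++ ":+" ++ PySem.Int.toStr points])) := by
  by_cases h10 : (10:Int) ≤ c <;> by_cases h7 : (7:Int) ≤ c <;>
    by_cases h5 : (5:Int) ≤ c <;> by_cases h3 : (3:Int) ≤ c <;>
    first
      | omega
      | simp [pvALoop, List.countP_nil, h10, h7, h5, h3]

-- ===== VERDICT (by name: the statement is the Claim_ definition above) =====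
theorem score_confluence_spec : Claim_equal_score_confluence := by
  intro signal _
  unfold Spec_score_confluence score_confluence score_confluence_alt
  rw [pvSorted_weights, pvCore]
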